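-- pv_equiv track=rewrite | github.com/Pyk017/Python | InfyTQ(Infosys_Platform)/Fundamentals_of_Python_Practise_Problems/Level1/Problem-46.py | double_preceding
-- ===== SOURCE A (Python) =====
-- def double_preceding(values):
--     if len(values) > 0:
--         previous = values[0]
--         values[0] = 0
--         for idx in range(1, len(values)):
--             temp = values[idx]
--             values[idx] = 2 * previous
--             previous = temp
--
--     return values
-- ===== SOURCE B (Python) =====
-- def double_preceding(values):
--     if values:
--         # pass 1: shift right by one (drop last, prepend zero)
--         values.pop()
--         values.insert(0, 0)
--         # pass 2: double everything after the head
--         for i in range(1, len(values)):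
--             values[i] *= 2
--     return values
-- ===== Notes on version B (the rewrite author's own statement) =====
-- stated objective: alternative
-- what changed: Replaces A's single in-place pass threading a previous/temp carry with two carry-free staged passes: shift the list right by one (pop last, insert 0 at front), then double every element after the head.
import Mathlib
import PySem

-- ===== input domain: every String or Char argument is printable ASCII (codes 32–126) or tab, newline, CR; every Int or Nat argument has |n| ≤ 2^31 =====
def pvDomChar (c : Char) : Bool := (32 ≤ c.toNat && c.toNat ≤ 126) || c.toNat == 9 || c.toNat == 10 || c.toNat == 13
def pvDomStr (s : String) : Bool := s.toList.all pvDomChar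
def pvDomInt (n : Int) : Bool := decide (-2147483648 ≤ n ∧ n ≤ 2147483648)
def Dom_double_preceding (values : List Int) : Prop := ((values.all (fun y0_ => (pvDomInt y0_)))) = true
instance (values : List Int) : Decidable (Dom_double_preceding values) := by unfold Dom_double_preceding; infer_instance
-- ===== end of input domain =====

-- B replaces A's carry-threading single pass with two staged passes (shift right, then double the tail); alternative decomposition, return value only (B performs the same in-place mutation in Python).


-- ===== PORT A =====
-- the for-loop: temp = values[idx]; values[idx] = 2*previous; previous = temp
def dpLoopA (previous : Int) : List Int → List Int
  | [] => []
  | temp :: rest => (2 * previous) :: dpLoopA temp rest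

def double_preceding (values : List Int) : List Int :=
  match values with
  | [] => values
  | v :: rest => 0 :: dpLoopA v rest

-- ===== PORT B =====
-- pass 2 of B: double every element (applied after the head)
def dpDoubleAll : List Int → List Int
  | [] => []
  | x :: rest => (x * 2) :: dpDoubleAll rest

def double_preceding_alt (values : List Int) : List Int :=
  if values = [] then values
  else
    -- pass 1: shift right (pop last, insert 0 at front)
    match (0 : Int) :: values.dropLast with
    | [] => []
    | h :: t => h :: dpDoubleAll t

-- ===== PRECONDITION & SPEC =====
def Spec_double_preceding (values : List Int) (out : List Int) : Prop := out = double_preceding_alt values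
instance (values : List Int) (out : List Int) : Decidable (Spec_double_preceding values out) := by unfold Spec_double_preceding; infer_instance

-- ===== CLAIM (what is proved, stated in full; the proofs are below) =====
def Claim_equal_double_preceding : Prop := ∀ (values : List Int), Dom_double_preceding values → Spec_double_preceding values (double_preceding values)

-- ===== LEMMAS AND PROOFS =====
theorem dpLoopA_eq (v : Int) (rest : List Int) :
    dpLoopA v rest = dpDoubleAll (v :: rest).dropLast := by
  induction rest generalizing v with
  | nil => simp [dpLoopA, dpDoubleAll]
  | cons t r ih => simp [dpLoopA, dpDoubleAll, ih t, mul_comm]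

-- ===== VERDICT (by name: the statement is the Claim_ definition above) =====
theorem double_preceding_spec : Claim_equal_double_preceding := by
  intro values _
  unfold Spec_double_preceding double_preceding double_preceding_alt
  cases values with
  | nil => simp
  | cons v rest => simp [dpLoopA_eq]
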